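-- pv_equiv track=rewrite | github.com/julesrubin/advent-of-code | 2025/1.py | compute_result_part2
-- ===== SOURCE A (Python) =====
-- def compute_result_part2(data):
--     position = 50
--     modulo = 100
--     # we now need to count how many time we pass THROUGH position 0
--     count = 0
--     for move in data:
--         steps = abs(move)
--         step_direction = 1 if move > 0 else -1
--         for _ in range(steps):
--             # not optimized at all but works :)
--             position = (position + step_direction) % modulo
--             if position == 0:
--                 count += 1
--     return count
-- ===== SOURCE B (Python) =====
-- def compute_result_part2(data):
--     position = 50
--     count = 0
--     for move in data:
--         steps = abs(move)
--         d = 1 if move > 0 else -1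
--         r = (-d * position) % 100
--         if r == 0:
--             r = 100
--         if steps >= r:
--             count += (steps - r) // 100 + 1
--         position = (position + d * steps) % 100
--     return count
-- ===== Notes on version B (the rewrite author's own statement) =====
-- stated objective: faster
-- what changed: Replaces A's one-step-at-a-time simulation of each move (inner loop over range(abs(move))) by a per-move closed-form count of the k in [1,steps] with position + dir*k ≡ 0 (mod 100), plus a direct modular position update.
import Mathlib
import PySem

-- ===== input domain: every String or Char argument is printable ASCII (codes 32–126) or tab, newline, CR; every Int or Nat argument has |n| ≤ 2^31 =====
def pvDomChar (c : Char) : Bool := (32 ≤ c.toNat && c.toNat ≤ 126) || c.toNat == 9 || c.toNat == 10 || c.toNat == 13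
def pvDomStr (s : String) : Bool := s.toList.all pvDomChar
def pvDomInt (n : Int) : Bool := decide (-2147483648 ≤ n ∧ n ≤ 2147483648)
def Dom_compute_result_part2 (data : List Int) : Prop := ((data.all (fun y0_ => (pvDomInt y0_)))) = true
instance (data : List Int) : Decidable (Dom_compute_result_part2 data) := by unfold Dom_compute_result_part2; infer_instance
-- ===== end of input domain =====

-- B replaces A's step-by-step walk (O(sum |move|)) by a per-move closed-form count of the
-- multiples of 100 crossed, an asymptotic speed-up to O(len(data)).

-- ===== PORT A =====
-- inner 'for _ in range(steps)' loop of A, over the state (position, count)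
def pvStepA (d : Int) : Nat → Int × Int → Int × Int
  | 0, s => s
  | n+1, s =>
      let pos' := PySem.Int.mod (s.1 + d) 100
      pvStepA d n (pos', if pos' = 0 then s.2 + 1 else s.2)

def compute_result_part2 (data : List Int) : Int :=
  (data.foldl (fun s move =>
      pvStepA (if move > 0 then 1 else -1) move.natAbs s) ((50 : Int), (0 : Int))).2

-- ===== PORT B =====
-- one move of B: closed-form count of k in [1,steps] with position + d*k ≡ 0 (mod 100)
def pvMoveB (s : Int × Int) (move : Int) : Int × Int :=
  let pos := s.1
  let count := s.2
  let steps : Int := |move|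
  let d : Int := if move > 0 then 1 else -1
  let r0 := PySem.Int.mod (-d * pos) 100
  let r := if r0 = 0 then 100 else r0
  let count' := if steps ≥ r then count + (PySem.Int.floordiv (steps - r) 100 + 1) else count
  (PySem.Int.mod (pos + d * steps) 100, count')

def compute_result_part2_alt (data : List Int) : Int :=
  (data.foldl pvMoveB ((50 : Int), (0 : Int))).2

-- ===== PRECONDITION & SPEC =====
def Spec_compute_result_part2 (data : List Int) (out : Int) : Prop := out = compute_result_part2_alt data
instance (data : List Int) (out : Int) : Decidable (Spec_compute_result_part2 data out) := by unfold Spec_compute_result_part2; infer_instance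

-- ===== CLAIM (what is proved, stated in full; the proofs are below) =====
def Claim_equal_compute_result_part2 : Prop := ∀ (data : List Int), Dom_compute_result_part2 data → Spec_compute_result_part2 data (compute_result_part2 data)

-- ===== LEMMAS AND PROOFS =====

-- closed-form value of the count accumulated by A's inner loop of n steps from pos
def pvF (d pos : Int) (n : Nat) : Int :=
  let r0 := (-d * pos) % 100
  let r := if r0 = 0 then 100 else r0
  if r ≤ (n : Int) then ((n : Int) - r) / 100 + 1 else 0

theorem pvStepA_closed (d : Int) (hd : d = 1 ∨ d = -1) (n : Nat) :
    ∀ pos count : Int, 0 ≤ pos → pos < 100 →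
      pvStepA d n (pos, count) = ((pos + d * n) % 100, count + pvF d pos n) := by
  induction n with
  | zero =>
      intro pos count h0 h1
      simp only [pvStepA, pvF, Nat.cast_zero, mul_zero, add_zero, Prod.mk.injEq]
      constructor
      · omega
      · rcases hd with rfl | rfl <;> (split_ifs <;> omega)
  | succ n ih =>
      intro pos count h0 h1
      have hm : PySem.Int.mod (pos + d) 100 = (pos + d) % 100 :=
        PySem.Int.mod_eq_emod_of_pos (by norm_num)
      have h0' : 0 ≤ (pos + d) % 100 := Int.emod_nonneg _ (by norm_num)
      have h1' : (pos + d) % 100 < 100 := Int.emod_lt_of_pos _ (by norm_num)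
      simp only [pvStepA, hm]
      rw [ih ((pos + d) % 100) _ h0' h1']
      simp only [Prod.mk.injEq]
      constructor
      · rcases hd with rfl | rfl <;> (push_cast; omega)
      · simp only [pvF]
        rcases hd with rfl | rfl <;>
          (push_cast; split_ifs <;> omega)

theorem foldl_eq (data : List Int) : ∀ pos count : Int, 0 ≤ pos → pos < 100 →
    data.foldl (fun s move => pvStepA (if move > 0 then 1 else -1) move.natAbs s) (pos, count)
      = data.foldl pvMoveB (pos, count) := by
  induction data with
  | nil => intro pos count _ _; rfl
  | cons move rest ih =>
      intro pos count h0 h1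
      have hd : (if move > 0 then (1 : Int) else -1) = 1 ∨
                (if move > 0 then (1 : Int) else -1) = -1 := by
        split_ifs <;> simp
      simp only [List.foldl_cons]
      rw [pvStepA_closed _ hd move.natAbs pos count h0 h1]
      have habs : ((move.natAbs : Int)) = |move| := Int.natCast_natAbs move
      have hB : pvMoveB (pos, count) move
          = ((pos + (if move > 0 then (1 : Int) else -1) * move.natAbs) % 100,
             count + pvF (if move > 0 then (1 : Int) else -1) pos move.natAbs) := by
        simp only [pvMoveB, pvF, habs,
          PySem.Int.mod_eq_emod_of_pos (by norm_num : (0:Int) < 100),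
          PySem.Int.floordiv_eq_ediv_of_pos (by norm_num : (0:Int) < 100), Prod.mk.injEq]
        constructor
        · trivial
        · split_ifs <;> omega
      rw [hB, ih _ _ (Int.emod_nonneg _ (by norm_num)) (Int.emod_lt_of_pos _ (by norm_num))]

-- ===== VERDICT (by name: the statement is the Claim_ definition above) =====
theorem compute_result_part2_spec : Claim_equal_compute_result_part2 := by
  intro data _
  unfold Spec_compute_result_part2 compute_result_part2 compute_result_part2_alt
  rw [foldl_eq data 50 0 (by norm_num) (by norm_num)]
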